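-- pv_equiv track=rewrite | github.com/samplecm/Organogenesis | PostProcessing.py | FilterIslands
-- ===== SOURCE A (Python) =====
-- def FilterIslands(slices):
--     """Removes islands by recursively taking the largest chunk in the list.
--         Lists are separated by 5 or more slices.
--
--     Args:
--         slices (list): list of indices for slices with at least one point
--     Returns:
--         slices (list): the list of indices with islands removed
--
--     """
--
--     maxGap, maxGapIndex = MaxGap(slices)
--     #return largest half on either side of maxGap
--     if maxGap >= 5:
--         if max(maxGapIndex,len(slices)-maxGapIndex) == maxGapIndex: #bottom half largest:
--             newSlices = slices[0:maxGapIndex]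
--         else:
--             newSlices = slices[maxGapIndex:]
--
--         return FilterIslands(newSlices)
--     else:
--         return slices
--
-- def MaxGap(slices):
--     """Finds the largest separation of adjacent integers
--     in a list of integers.
--
--     Args:
--         slices (list): list of indices for slices with at least one point
--     Returns:
--         maxGap (int): the largest difference between adjacent indices in slices
--         maxGapIndex (int): the index at which the largest gap occurs
--
--     """
--
--     maxGap = 0
--     maxGapIndex = 0
--     for i in range(1, len(slices)):
--         sliceSeparation = slices[i]-slices[i-1]
--         if sliceSeparation > maxGap:
--             maxGap = sliceSeparation
--             maxGapIndex = i
--     return maxGap, maxGapIndex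
-- ===== SOURCE B (Python) =====
-- def FilterIslands(slices):
--     """Island removal by window narrowing: precompute once the positions of
--     gaps >= 5, then iteratively shrink an index window [lo, hi) to the larger
--     side of the leftmost-maximal big gap; returns slices[lo:hi] (no recursion,
--     no intermediate list copies)."""
--     n = len(slices)
--     big = [(i, slices[i] - slices[i - 1]) for i in range(1, n)
--            if slices[i] - slices[i - 1] >= 5]
--     lo, hi = 0, n
--     while True:
--         bestG, bestI = 0, -1
--         for i, g in big:
--             if lo < i and i < hi and g > bestG:
--                 bestG, bestI = g, i
--         if bestI < 0:
--             return slices[lo:hi]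
--         if bestI - lo >= hi - bestI:
--             hi = bestI
--         else:
--             lo = bestI
-- ===== Notes on version B (the rewrite author's own statement) =====
-- stated objective: alternative
-- what changed: Replaces A's recursion with list slicing and full rescans by a single precomputation of the positions of gaps >= 5 plus an iterative two-pointer window [lo,hi) that narrows to the larger side of the leftmost maximal big gap; the answer is one final slice, no intermediate copies.
import Mathlib
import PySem

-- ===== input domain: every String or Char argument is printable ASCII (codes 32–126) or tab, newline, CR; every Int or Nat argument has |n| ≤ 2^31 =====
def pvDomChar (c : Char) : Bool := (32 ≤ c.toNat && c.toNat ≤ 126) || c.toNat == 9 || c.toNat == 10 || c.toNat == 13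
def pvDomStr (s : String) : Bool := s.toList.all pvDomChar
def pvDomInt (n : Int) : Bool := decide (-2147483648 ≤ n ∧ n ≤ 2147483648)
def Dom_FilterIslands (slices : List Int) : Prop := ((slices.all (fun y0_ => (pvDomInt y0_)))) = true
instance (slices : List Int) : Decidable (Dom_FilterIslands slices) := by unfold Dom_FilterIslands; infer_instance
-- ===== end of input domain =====

-- B replaces A's recursive slice-copying by one precomputed list of big-gap positions and an
-- iterative index window narrowed to the larger side of the leftmost maximal gap (objective: alternative).

-- ===== PORT A =====

-- termination helper for the ports: a "track the first strict improver" fold either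
-- leaves the state unchanged or lands on an element of the list
theorem selFold_cases (f : Int → Int) (L : List Int) (s : Int × Int) :
    L.foldl (fun s i => if f i > s.1 then (f i, i) else s) s = s ∨
      (L.foldl (fun s i => if f i > s.1 then (f i, i) else s) s).2 ∈ L := by
  induction L generalizing s with
  | nil => exact Or.inl rfl
  | cons p t ih =>
    simp only [List.foldl_cons]
    by_cases h : f p > s.1
    · simp only [h, if_pos]
      rcases ih (f p, p) with h1 | h1
      · exact Or.inr (by rw [h1]; simp)
      · exact Or.inr (List.mem_cons_of_mem _ h1)
    · simp only [h, if_neg, not_false_iff]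
      rcases ih s with h1 | h1
      · exact Or.inl h1
      · exact Or.inr (List.mem_cons_of_mem _ h1)

def MaxGap (slices : List Int) : Int × Int :=
  (PySem.List.pyRange 1 (slices.length : Int) 1).foldl
    (fun s i =>
      let sliceSeparation := PySem.List.pyGetD slices i 0 - PySem.List.pyGetD slices (i - 1) 0
      if sliceSeparation > s.1 then (sliceSeparation, i) else s)
    (0, 0)

theorem MaxGap_bounds (slices : List Int) (h : (MaxGap slices).1 ≥ 5) :
    1 ≤ (MaxGap slices).2 ∧ (MaxGap slices).2 < (slices.length : Int) := by
  have := selFold_cases (fun i => PySem.List.pyGetD slices i 0 - PySem.List.pyGetD slices (i - 1) 0)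
    (PySem.List.pyRange 1 (slices.length : Int) 1) (0, 0)
  unfold MaxGap at h ⊢
  rcases this with h1 | h1
  · rw [h1] at h; norm_num at h
  · rw [PySem.List.mem_pyRange_one] at h1; omega

def FilterIslands (slices : List Int) : List Int :=
  let r := MaxGap slices
  if _h : r.1 ≥ 5 then
    if max r.2 ((slices.length : Int) - r.2) = r.2 then
      FilterIslands (PySem.List.slice slices (some 0) (some r.2))
    else
      FilterIslands (PySem.List.slice slices (some r.2) none)
  else
    slices
termination_by slices.length
decreasing_by
  · have hb := MaxGap_bounds slices _h
    rw [PySem.List.slice_toNat _ (by omega) (by omega)]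
    simp only [List.length_take, List.length_drop, Int.toNat_zero]
    omega
  · have hb := MaxGap_bounds slices _h
    rw [PySem.List.slice_from _ (by omega)]
    simp only [List.length_drop]
    omega

-- ===== PORT B =====

-- B's inner for-loop over the precomputed big-gap list: first window element strictly
-- improving the running max
def BSel (big : List (Int × Int)) (lo hi : Int) : Int × Int :=
  big.foldl (fun s p => if lo < p.1 ∧ p.1 < hi ∧ p.2 > s.1 then (p.2, p.1) else s)
    ((0 : Int), (-1 : Int))

-- termination helper: the window-restricted selection fold either leaves the initial
-- state unchanged or returns an index strictly inside the window
theorem selB_cases (lo hi : Int) (L : List (Int × Int)) (s : Int × Int) :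
    L.foldl (fun s p => if lo < p.1 ∧ p.1 < hi ∧ p.2 > s.1 then (p.2, p.1) else s) s = s ∨
      (lo < (L.foldl (fun s p => if lo < p.1 ∧ p.1 < hi ∧ p.2 > s.1 then (p.2, p.1) else s) s).2 ∧
        (L.foldl (fun s p => if lo < p.1 ∧ p.1 < hi ∧ p.2 > s.1 then (p.2, p.1) else s) s).2 < hi) := by
  induction L generalizing s with
  | nil => exact Or.inl rfl
  | cons p t ih =>
    simp only [List.foldl_cons]
    by_cases h : lo < p.1 ∧ p.1 < hi ∧ p.2 > s.1
    · rw [if_pos h]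
      rcases ih (p.2, p.1) with h1 | h1
      · exact Or.inr (by rw [h1]; exact ⟨h.1, h.2.1⟩)
      · exact Or.inr h1
    · rw [if_neg h]
      rcases ih s with h1 | h1
      · exact Or.inl h1
      · exact Or.inr h1

theorem BSel_cases (big : List (Int × Int)) (lo hi : Int) :
    BSel big lo hi = (0, -1) ∨ (lo < (BSel big lo hi).2 ∧ (BSel big lo hi).2 < hi) :=
  selB_cases lo hi big _

def BLoop (slices : List Int) (big : List (Int × Int)) (lo hi : Int) : List Int :=
  let r := BSel big lo hi
  if _h : r.2 < 0 then
    PySem.List.slice slices (some lo) (some hi)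
  else
    if r.2 - lo ≥ hi - r.2 then
      BLoop slices big lo r.2
    else
      BLoop slices big r.2 hi
termination_by (hi - lo).toNat
decreasing_by
  all_goals
    rcases BSel_cases big lo hi with h1 | h1
    · have hr : r = BSel big lo hi := rfl
      rw [hr, h1] at _h; norm_num at _h
    · omega

def FilterIslands_alt (slices : List Int) : List Int :=
  let n : Int := (slices.length : Int)
  let big := ((PySem.List.pyRange 1 n 1).filter
      (fun i => PySem.List.pyGetD slices i 0 - PySem.List.pyGetD slices (i - 1) 0 ≥ 5)).map
    (fun i => (i, PySem.List.pyGetD slices i 0 - PySem.List.pyGetD slices (i - 1) 0))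
  BLoop slices big 0 n

-- ===== PRECONDITION & SPEC =====
def Spec_FilterIslands (slices : List Int) (out : List Int) : Prop := out = FilterIslands_alt slices
instance (slices : List Int) (out : List Int) : Decidable (Spec_FilterIslands slices out) := by unfold Spec_FilterIslands; infer_instance

-- ===== CLAIM (what is proved, stated in full; the proofs are below) =====
def Claim_equal_FilterIslands : Prop := ∀ (slices : List Int), Dom_FilterIslands slices → Spec_FilterIslands slices (FilterIslands slices)

-- ===== LEMMAS AND PROOFS =====

-- proof-side vocabulary: the selection step, the gap at a position, window pair lists
def gstep (s p : Int × Int) : Int × Int := if p.2 > s.1 then (p.2, p.1) else s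

theorem gstep_pos {s p : Int × Int} (h : p.2 > s.1) : gstep s p = (p.2, p.1) := if_pos h
theorem gstep_neg {s p : Int × Int} (h : ¬ p.2 > s.1) : gstep s p = s := if_neg h

def gap (xs : List Int) (i : Int) : Int :=
  PySem.List.pyGetD xs i 0 - PySem.List.pyGetD xs (i - 1) 0

def pairsWin (xs : List Int) (a b : Int) : List (Int × Int) :=
  (PySem.List.pyRange a b 1).map (fun i => (i, gap xs i))

def bigList (xs : List Int) : List (Int × Int) :=
  ((PySem.List.pyRange 1 (xs.length : Int) 1).filter
      (fun i => PySem.List.pyGetD xs i 0 - PySem.List.pyGetD xs (i - 1) 0 ≥ 5)).map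
    (fun i => (i, PySem.List.pyGetD xs i 0 - PySem.List.pyGetD xs (i - 1) 0))

-- a state-independent window test inside the fold is a filter
theorem cond_to_gstep (lo hi : Int) (L : List (Int × Int)) (s : Int × Int) :
    L.foldl (fun s p => if lo < p.1 ∧ p.1 < hi ∧ p.2 > s.1 then (p.2, p.1) else s) s =
      (L.filter (fun p => lo < p.1 ∧ p.1 < hi)).foldl gstep s := by
  induction L generalizing s with
  | nil => rfl
  | cons p t ih =>
    by_cases hw : lo < p.1 ∧ p.1 < hi
    · have hfc : (p :: t).filter (fun p => lo < p.1 ∧ p.1 < hi) =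
          p :: t.filter (fun p => lo < p.1 ∧ p.1 < hi) := by simp [hw]
      rw [hfc, List.foldl_cons, List.foldl_cons]
      by_cases hg : p.2 > s.1
      · rw [if_pos ⟨hw.1, hw.2, hg⟩, gstep_pos hg]; exact ih _
      · rw [if_neg (by tauto), gstep_neg hg]; exact ih _
    · have hfc : (p :: t).filter (fun p => lo < p.1 ∧ p.1 < hi) =
          t.filter (fun p => lo < p.1 ∧ p.1 < hi) := by simp [hw]
      rw [hfc, List.foldl_cons, if_neg (by tauto)]
      exact ih _

-- the running first component only grows and dominates every gap seen
theorem gfold_fst_ge (L : List (Int × Int)) (s : Int × Int) :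
    s.1 ≤ (L.foldl gstep s).1 ∧ ∀ p ∈ L, p.2 ≤ (L.foldl gstep s).1 := by
  induction L generalizing s with
  | nil => exact ⟨le_refl _, by simp⟩
  | cons p t ih =>
    simp only [List.foldl_cons]
    by_cases hg : p.2 > s.1
    · rw [gstep_pos hg]
      refine ⟨le_trans (le_of_lt hg) (ih (p.2, p.1)).1, ?_⟩
      intro q hq
      rcases List.mem_cons.mp hq with h | h
      · rw [h]; exact (ih (p.2, p.1)).1
      · exact (ih (p.2, p.1)).2 q h
    · rw [gstep_neg hg]
      refine ⟨(ih s).1, ?_⟩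
      intro q hq
      rcases List.mem_cons.mp hq with h | h
      · subst h; exact le_trans (by omega) (ih s).1
      · exact (ih s).2 q h

-- the fold either keeps its initial state or lands on a list element
theorem gfold_cases (L : List (Int × Int)) (s : Int × Int) :
    L.foldl gstep s = s ∨ ∃ p ∈ L, L.foldl gstep s = (p.2, p.1) := by
  induction L generalizing s with
  | nil => exact Or.inl rfl
  | cons p t ih =>
    simp only [List.foldl_cons]
    by_cases hg : p.2 > s.1
    · rw [gstep_pos hg]
      rcases ih (p.2, p.1) with h | ⟨q, hq, h⟩
      · exact Or.inr ⟨p, List.mem_cons_self, h⟩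
      · exact Or.inr ⟨q, List.mem_cons_of_mem _ hq, h⟩
    · rw [gstep_neg hg]
      rcases ih s with h | ⟨q, hq, h⟩
      · exact Or.inl h
      · exact Or.inr ⟨q, List.mem_cons_of_mem _ hq, h⟩

-- once the running max is ≥ 5, gaps below 5 never matter
theorem gfold_filter5_of_ge (L : List (Int × Int)) (s : Int × Int) (hs : 5 ≤ s.1) :
    (L.filter (fun p => p.2 ≥ 5)).foldl gstep s = L.foldl gstep s := by
  induction L generalizing s with
  | nil => rfl
  | cons p t ih =>
    simp only [List.filter_cons, List.foldl_cons]
    by_cases h5 : p.2 ≥ 5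
    · simp only [h5, decide_true, if_true, List.foldl_cons]
      by_cases hg : p.2 > s.1
      · rw [gstep_pos hg]; exact ih (p.2, p.1) (by omega)
      · rw [gstep_neg hg]; exact ih s hs
    · have hskip : gstep s p = s := gstep_neg (by omega)
      simp only [h5, decide_false, if_neg, not_false_iff, Bool.false_eq_true, hskip]
      exact ih s hs

-- while both running maxima are below 5 the filtered and unfiltered folds converge
-- (as soon as the unfiltered fold ends at least at 5)
theorem gfold_filter5 (L : List (Int × Int)) (c x c' x' : Int) (hcc : c ≤ c') (hc5 : c' < 5)
    (hfin : 5 ≤ (L.foldl gstep (c', x')).1) :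
    (L.filter (fun p => p.2 ≥ 5)).foldl gstep (c, x) = L.foldl gstep (c', x') := by
  induction L generalizing c x c' x' with
  | nil => simp only [List.foldl_nil] at hfin; omega
  | cons p t ih =>
    simp only [List.filter_cons, List.foldl_cons] at hfin ⊢
    by_cases h5 : p.2 ≥ 5
    · have h1 : gstep (c', x') p = (p.2, p.1) := gstep_pos (by omega)
      have h2 : gstep (c, x) p = (p.2, p.1) := gstep_pos (by omega)
      simp only [h5, decide_true, if_true, List.foldl_cons, h1, h2]
      exact gfold_filter5_of_ge t (p.2, p.1) (by simpa using h5)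
    · simp only [h5, decide_false, if_neg, not_false_iff, Bool.false_eq_true]
      by_cases hg : p.2 > c'
      · rw [gstep_pos hg] at hfin ⊢
        exact ih c x p.2 p.1 (by omega) (by omega) hfin
      · rw [gstep_neg hg] at hfin ⊢
        exact ih c x c' x' hcc hc5 hfin

-- shifting every index by lo commutes with the selection fold
theorem gfold_shift (L : List Int) (f : Int → Int) (lo : Int) :
    ∀ (c x : Int),
      (L.map (fun i => (i - lo, f i))).foldl gstep (c, x) =
        (((L.map (fun i => (i, f i))).foldl gstep (c, x + lo)).1,
          ((L.map (fun i => (i, f i))).foldl gstep (c, x + lo)).2 - lo) := by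
  induction L with
  | nil => intro c x; simp
  | cons i t ih =>
    intro c x
    simp only [List.map_cons, List.foldl_cons, gstep]
    by_cases hg : f i > c
    · rw [if_pos hg, if_pos hg]
      have := ih (f i) (i - lo)
      rwa [sub_add_cancel] at this
    · rw [if_neg hg, if_neg hg]
      exact ih c x

-- the index range of a window, shifted down to start at 1
theorem range_shift (lo hi : Int) :
    PySem.List.pyRange 1 (hi - lo) 1 = (PySem.List.pyRange (lo + 1) hi 1).map (fun i => i - lo) := by
  rw [PySem.List.pyRange_one, PySem.List.pyRange_one, List.map_map]
  have h1 : hi - lo - 1 = hi - (lo + 1) := by ring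
  rw [h1]
  apply List.map_congr_left
  intro k _
  simp only [Function.comp_apply]
  ring

-- restricting the full gap range to a window is the window range
theorem range_filter_window (n lo hi : Int) (h0 : 0 ≤ lo) (hlh : lo ≤ hi) (hn : hi ≤ n) :
    (PySem.List.pyRange 1 n 1).filter (fun i => lo < i ∧ i < hi) =
      PySem.List.pyRange (lo + 1) hi 1 := by
  by_cases hlt : lo < hi
  · rw [PySem.List.pyRange_one_append 1 (lo + 1) n (by omega) (by omega),
      PySem.List.pyRange_one_append (lo + 1) hi n (by omega) (by omega),
      List.filter_append, List.filter_append]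
    rw [List.filter_eq_nil_iff.mpr ?_, List.filter_eq_self.mpr ?_, List.filter_eq_nil_iff.mpr ?_]
    · simp
    · intro i hi'
      rw [PySem.List.mem_pyRange_one] at hi'
      simp only [decide_eq_true_eq, not_and]
      omega
    · intro i hi'
      rw [PySem.List.mem_pyRange_one] at hi'
      simp only [decide_eq_true_eq]
      omega
    · intro i hi'
      rw [PySem.List.mem_pyRange_one] at hi'
      simp only [decide_eq_true_eq, not_and]
      omega
  · rw [List.filter_eq_nil_iff.mpr ?_, PySem.List.pyRange_one_eq_nil (by omega)]
    intro i hi'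
    rw [PySem.List.mem_pyRange_one] at hi'
    simp only [decide_eq_true_eq, not_and]
    omega

-- indexing into the window is indexing into the original list, shifted
theorem pyGetD_window (xs : List Int) (lo hi : Nat) (hhi : hi ≤ xs.length) (t : Int)
    (h0 : 0 ≤ t) (hlt : t < (hi : Int) - (lo : Int)) :
    PySem.List.pyGetD ((xs.drop lo).take (hi - lo)) t 0 =
      PySem.List.pyGetD xs ((lo : Int) + t) 0 := by
  have hlen : ((xs.drop lo).take (hi - lo)).length = hi - lo := by
    simp only [List.length_take, List.length_drop]; omega
  rw [PySem.List.pyGetD_eq_getElem _ 0 h0 (by rw [hlen]; push_cast; omega),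
    PySem.List.pyGetD_eq_getElem _ 0 (by omega) (by push_cast; omega)]
  rw [List.getElem_take, List.getElem_drop]
  congr 1
  omega

-- A's MaxGap on the window, expressed as the gstep fold over window pairs
theorem MaxGap_window (xs : List Int) (lo hi : Nat) (hlh : lo ≤ hi) (hhi : hi ≤ xs.length) :
    MaxGap ((xs.drop lo).take (hi - lo)) =
      (((pairsWin xs ((lo : Int) + 1) hi).foldl gstep (0, (lo : Int))).1,
        ((pairsWin xs ((lo : Int) + 1) hi).foldl gstep (0, (lo : Int))).2 - lo) := by
  unfold MaxGap
  have hwlen : ((((xs.drop lo).take (hi - lo)).length : Nat) : Int) = (hi : Int) - lo := by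
    simp only [List.length_take, List.length_drop]
    omega
  rw [hwlen, range_shift lo hi, List.foldl_map]
  rw [PySem.List.foldl_congr_mem _ _ (fun s i => gstep s (i - lo, gap xs i)) _ ?_]
  · rw [← List.foldl_map]
    have := gfold_shift (PySem.List.pyRange ((lo : Int) + 1) hi 1) (gap xs) lo 0 0
    simp only [zero_add] at this
    rw [this]
    rfl
  · intro acc i himem
    rw [PySem.List.mem_pyRange_one] at himem
    have h1 : PySem.List.pyGetD ((xs.drop lo).take (hi - lo)) (i - lo) 0 =
        PySem.List.pyGetD xs i 0 := by
      rw [pyGetD_window xs lo hi hhi (i - lo) (by omega) (by omega)]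
      congr 1; ring
    have h2 : PySem.List.pyGetD ((xs.drop lo).take (hi - lo)) (i - lo - 1) 0 =
        PySem.List.pyGetD xs (i - 1) 0 := by
      rw [pyGetD_window xs lo hi hhi (i - lo - 1) (by omega) (by omega)]
      congr 1; ring
    simp only [h1, h2]
    rfl

-- B's selection over the precomputed big list, expressed over filtered window pairs
theorem BSel_window (xs : List Int) (lo hi : Nat) (hlh : lo ≤ hi) (hhi : hi ≤ xs.length) :
    BSel (bigList xs) (lo : Int) (hi : Int) =
      ((pairsWin xs ((lo : Int) + 1) hi).filter (fun p => p.2 ≥ 5)).foldl gstep (0, -1) := by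
  unfold BSel
  rw [cond_to_gstep]
  congr 1
  have hb : bigList xs =
      ((PySem.List.pyRange 1 (xs.length : Int) 1).filter (fun i => gap xs i ≥ 5)).map
        (fun i => (i, gap xs i)) := rfl
  have hp : pairsWin xs ((lo : Int) + 1) hi =
      (PySem.List.pyRange ((lo : Int) + 1) hi 1).map (fun i => (i, gap xs i)) := rfl
  rw [hb, hp, List.filter_map, List.filter_map]
  congr 1
  have hc1 : ((fun p : Int × Int => decide ((lo : Int) < p.1 ∧ p.1 < hi)) ∘
      (fun i => (i, gap xs i))) = fun i : Int => decide ((lo : Int) < i ∧ i < hi) := rfl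
  have hc2 : ((fun p : Int × Int => decide (p.2 ≥ 5)) ∘
      (fun i => (i, gap xs i))) = fun i : Int => decide (gap xs i ≥ 5) := rfl
  rw [hc1, hc2]
  rw [List.filter_filter, ← range_filter_window (xs.length : Int) lo hi (by omega)
    (by exact_mod_cast hlh) (by exact_mod_cast hhi), List.filter_filter]
  apply List.filter_congr
  intro i _
  simp [Bool.and_comm]

theorem main_loop_eq (xs : List Int) : ∀ (k lo hi : Nat), hi ≤ xs.length → lo ≤ hi →
    hi - lo = k →
    BLoop xs (bigList xs) (lo : Int) (hi : Int) =
      FilterIslands (PySem.List.slice xs (some (lo : Int)) (some (hi : Int))) := by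
  intro k
  induction k using Nat.strong_induction_on with
  | _ k ih =>
    intro lo hi hhi hlh hk
    rw [PySem.List.slice_natCast]
    have hA := MaxGap_window xs lo hi hlh hhi
    have hB := BSel_window xs lo hi hlh hhi
    set RA := (pairsWin xs ((lo : Int) + 1) hi).foldl gstep (0, (lo : Int)) with hRA
    rw [BLoop, FilterIslands]
    by_cases hg : RA.1 ≥ 5
    · -- a gap of at least 5 exists in the window: both sides split at the same index
      have hmem : (lo : Int) < RA.2 ∧ RA.2 < hi := by
        rcases gfold_cases (pairsWin xs ((lo : Int) + 1) hi) (0, (lo : Int)) with h | ⟨p, hpmem, h⟩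
        · rw [← hRA] at h
          rw [h] at hg; norm_num at hg
        · rw [← hRA] at h
          unfold pairsWin at hpmem
          rcases List.mem_map.mp hpmem with ⟨i, hir, hip⟩
          rw [PySem.List.mem_pyRange_one] at hir
          have : RA.2 = i := by rw [h, ← hip]
          omega
      have hBR : BSel (bigList xs) (lo : Int) (hi : Int) = RA := by
        rw [hB, hRA]
        exact gfold_filter5 _ 0 (-1) 0 (lo : Int) (le_refl 0) (by norm_num) hg
      have hwlen : ((((xs.drop lo).take (hi - lo)).length : Nat) : Int) = (hi : Int) - lo := by
        simp only [List.length_take, List.length_drop]; omega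
      simp only [hBR, hA, hwlen]
      rw [dif_neg (by omega : ¬ RA.2 < 0), dif_pos (by exact hg : (RA.1, RA.2 - (lo : Int)).1 ≥ 5)]
      set i' := RA.2.toNat with hi'
      have hic : ((i' : Nat) : Int) = RA.2 := by omega
      by_cases hc : (hi : Int) - RA.2 ≤ RA.2 - lo
      · -- keep the left (bottom) side
        rw [if_pos (by omega), if_pos ?_]
        · have hslice : PySem.List.slice ((xs.drop lo).take (hi - lo)) (some 0)
              (some ((RA.1, RA.2 - (lo : Int)).2)) = (xs.drop lo).take (i' - lo) := by
            show PySem.List.slice _ (some 0) (some (RA.2 - (lo : Int))) = _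
            rw [PySem.List.slice_toNat _ (by omega) (by omega)]
            simp only [Int.toNat_zero, List.drop_zero, Nat.sub_zero, List.take_take]
            congr 1
            omega
          rw [hslice, ← hic]
          have := ih (i' - lo) (by omega) lo i' (by omega) (by omega) rfl
          rw [PySem.List.slice_natCast] at this
          exact this
        · show max (RA.2 - (lo : Int)) ((hi : Int) - (lo : Int) - (RA.2 - (lo : Int))) = RA.2 - (lo : Int)
          rw [max_eq_left_iff]
          omega
      · -- keep the right (top) side
        rw [if_neg (by omega), if_neg ?_]
        · have hslice : PySem.List.slice ((xs.drop lo).take (hi - lo))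
              (some ((RA.1, RA.2 - (lo : Int)).2)) none = (xs.drop i').take (hi - i') := by
            show PySem.List.slice _ (some (RA.2 - (lo : Int))) none = _
            rw [PySem.List.slice_from _ (by omega), List.drop_take, List.drop_drop]
            congr 1
            · omega
            · congr 1; omega
          rw [hslice, ← hic]
          have := ih (hi - i') (by omega) i' hi hhi (by omega) rfl
          rw [PySem.List.slice_natCast] at this
          exact this
        · show ¬ max (RA.2 - (lo : Int)) ((hi : Int) - (lo : Int) - (RA.2 - (lo : Int))) = RA.2 - (lo : Int)
          rw [max_eq_left_iff]
          omega
    · -- no gap of 5 in the window: A keeps the window, B's candidate list is empty there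
      have hemp : (pairsWin xs ((lo : Int) + 1) hi).filter (fun p => p.2 ≥ 5) = [] := by
        apply List.filter_eq_nil_iff.mpr
        intro p hp
        have := (gfold_fst_ge (pairsWin xs ((lo : Int) + 1) hi) (0, (lo : Int))).2 p hp
        rw [← hRA] at this
        simp only [decide_eq_true_eq]
        omega
      have hBR : BSel (bigList xs) (lo : Int) (hi : Int) = (0, -1) := by
        rw [hB, hemp]
        rfl
      simp only [hBR, hA]
      rw [dif_pos (by norm_num : ((0 : Int), (-1 : Int)).2 < 0),
        dif_neg (by exact hg : ¬ (RA.1, RA.2 - (lo : Int)).1 ≥ 5)]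
      rw [PySem.List.slice_natCast]

-- ===== VERDICT (by name: the statement is the Claim_ definition above) =====
theorem FilterIslands_spec : Claim_equal_FilterIslands := by
  intro slices _
  unfold Spec_FilterIslands FilterIslands_alt
  have h := main_loop_eq slices slices.length 0 slices.length (le_refl _) (Nat.zero_le _) rfl
  simp only [Nat.cast_zero] at h
  have h2 : PySem.List.slice slices (some (0 : Int)) (some (slices.length : Int)) = slices := by
    simpa using PySem.List.slice_natCast slices 0 slices.length
  rw [h2] at h
  show FilterIslands slices = FilterIslands_alt slices
  calc FilterIslands slices = BLoop slices (bigList slices) 0 (slices.length : Int) := h.symm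
    _ = FilterIslands_alt slices := rfl
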